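-- pv_equiv track=rewrite | github.com/Rohanberiwal/CSE232-Computer-Networks | Network_Security/Assignment1/Transposition_Cipher_Encryption_Decyrption.py | populate_grid_for_decryption
-- ===== SOURCE A (Python) =====
-- def initialize_grid(num_rows, key):
--     return [['' for _ in range(key)] for _ in range(num_rows)]
--
-- def populate_grid_for_decryption(ciphertext, num_rows, key):
--     grid = initialize_grid(num_rows, key)
--     full_cols = len(ciphertext) % key
--     col_heights = [len(ciphertext) // key + (i < full_cols) for i in range(key)]
--
--     index = 0
--     for col in range(key):
--         for row in range(col_heights[col]):
--             grid[row][col] = ciphertext[index]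
--             index += 1
--     return grid
-- ===== SOURCE B (Python) =====
-- def populate_grid_for_decryption(ciphertext, num_rows, key):
--     n = len(ciphertext)
--     base, full = divmod(n, key)
--     return [[ciphertext[c * base + min(c, full) + r] if r < base + (c < full) else ''
--              for c in range(key)]
--             for r in range(num_rows)]
-- ===== Notes on version B (the rewrite author's own statement) =====
-- stated objective: simpler
-- what changed: B replaces A's mutable grid fill (per-column heights table plus nested column/row write loops with a running index) by a single comprehension that computes each cell's ciphertext position in closed form from divmod(len, key).
import Mathlib
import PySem

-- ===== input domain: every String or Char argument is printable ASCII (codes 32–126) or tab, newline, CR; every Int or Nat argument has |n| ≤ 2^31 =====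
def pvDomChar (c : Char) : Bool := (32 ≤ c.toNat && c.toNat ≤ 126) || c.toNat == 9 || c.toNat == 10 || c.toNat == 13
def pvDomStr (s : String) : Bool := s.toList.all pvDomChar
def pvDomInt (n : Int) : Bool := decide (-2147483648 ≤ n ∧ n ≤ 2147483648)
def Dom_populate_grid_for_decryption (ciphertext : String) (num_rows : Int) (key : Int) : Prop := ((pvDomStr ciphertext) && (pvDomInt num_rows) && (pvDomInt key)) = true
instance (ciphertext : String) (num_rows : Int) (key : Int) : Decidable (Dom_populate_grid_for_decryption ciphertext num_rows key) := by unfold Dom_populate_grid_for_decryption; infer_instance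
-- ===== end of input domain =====

-- B replaces A's mutable column-by-column fill (heights table + nested write loops) by a
-- single comprehension that computes each cell's ciphertext position in closed form (objective: simpler).

-- ===== PORT A =====
-- Python's s[i] is a 1-character string; build it from the char pyGet? returns (none = IndexError, excluded by Pre_).
def pvChAt (L : List Char) (i : Int) : String :=
  match PySem.List.pyGet? L i with
  | some ch => String.ofList [ch]
  | none => ""

-- grid[row][col] = v ; exact for the 0 ≤ row, col the loops produce (Python raises out of range, excluded by Pre_).
def pvSet2 (g : List (List String)) (r c : Int) (v : String) : List (List String) :=
  g.modify r.toNat (fun row => row.set c.toNat v)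

def initialize_grid (num_rows : Int) (key : Int) : List (List String) :=
  (PySem.List.pyRange 0 num_rows 1).map (fun _ => (PySem.List.pyRange 0 key 1).map (fun _ => ("" : String)))

def populate_grid_for_decryption (ciphertext : String) (num_rows : Int) (key : Int) : List (List String) :=
  let grid := initialize_grid num_rows key
  let n : Int := PySem.Str.len ciphertext
  let full_cols := PySem.Int.mod n key
  let col_heights := (PySem.List.pyRange 0 key 1).map
    (fun i => PySem.Int.floordiv n key + (if i < full_cols then (1 : Int) else 0))
  let st := (PySem.List.pyRange 0 key 1).foldl
    (fun (st : List (List String) × Int) col =>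
      (PySem.List.pyRange 0 (PySem.List.pyGetD col_heights col 0) 1).foldl
        (fun (st2 : List (List String) × Int) row =>
          (pvSet2 st2.1 row col (pvChAt ciphertext.toList st2.2), st2.2 + 1)) st)
    (grid, 0)
  st.1

-- ===== PORT B =====
def populate_grid_for_decryption_alt (ciphertext : String) (num_rows : Int) (key : Int) : List (List String) :=
  let n : Int := PySem.Str.len ciphertext
  let base := PySem.Int.floordiv n key
  let full := PySem.Int.mod n key
  (PySem.List.pyRange 0 num_rows 1).map (fun r =>
    (PySem.List.pyRange 0 key 1).map (fun c =>
      if r < base + (if c < full then (1 : Int) else 0) then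
        pvChAt ciphertext.toList (c * base + min c full + r)
      else ""))

-- ===== PRECONDITION & SPEC =====
-- Pre_ excludes exactly the inputs where the Python A raises: key = 0 (ZeroDivisionError at len % key),
-- and key > 0 with a non-empty ciphertext whose tallest column exceeds num_rows (IndexError at grid[row][col]).
def Pre_populate_grid_for_decryption (ciphertext : String) (num_rows : Int) (key : Int) : Prop :=
  key ≠ 0 ∧ (0 < key → ciphertext = "" ∨
    PySem.Int.floordiv (PySem.Str.len ciphertext) key +
      (if PySem.Int.mod (PySem.Str.len ciphertext) key = 0 then 0 else 1) ≤ num_rows)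
instance (ciphertext : String) (num_rows : Int) (key : Int) : Decidable (Pre_populate_grid_for_decryption ciphertext num_rows key) := by unfold Pre_populate_grid_for_decryption; infer_instance

def pvWitness_populate_grid_for_decryption : String × Int × Int := ("abcde", 2, 3)

def Spec_populate_grid_for_decryption (ciphertext : String) (num_rows : Int) (key : Int) (out : List (List String)) : Prop := out = populate_grid_for_decryption_alt ciphertext num_rows key
instance (ciphertext : String) (num_rows : Int) (key : Int) (out : List (List String)) : Decidable (Spec_populate_grid_for_decryption ciphertext num_rows key out) := by unfold Spec_populate_grid_for_decryption; infer_instance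

-- ===== CLAIM (what is proved, stated in full; the proofs are below) =====
def Claim_equal_populate_grid_for_decryption : Prop := ∀ (ciphertext : String) (num_rows : Int) (key : Int), Dom_populate_grid_for_decryption ciphertext num_rows key → Pre_populate_grid_for_decryption ciphertext num_rows key → Spec_populate_grid_for_decryption ciphertext num_rows key (populate_grid_for_decryption ciphertext num_rows key)

-- ===== LEMMAS AND PROOFS =====

-- a grid given by a function of (row, col)
def pvMkGrid (N K : Nat) (φ : Nat → Nat → String) : List (List String) :=
  (List.range N).map (fun r => (List.range K).map (fun c => φ r c))

-- height of column c and starting ciphertext position of column c, in Nat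
def pvHgt (nn K c : Nat) : Nat := nn / K + (if c < nn % K then 1 else 0)
def pvStart (nn K c : Nat) : Nat := c * (nn / K) + min c (nn % K)

lemma pvMkGrid_congr (N K : Nat) (φ ψ : Nat → Nat → String)
    (h : ∀ r < N, ∀ c < K, φ r c = ψ r c) : pvMkGrid N K φ = pvMkGrid N K ψ := by
  unfold pvMkGrid
  refine List.map_congr_left (fun r hr => List.map_congr_left (fun c hc => ?_))
  exact h r (List.mem_range.mp hr) c (List.mem_range.mp hc)

lemma pvSet2_mkGrid (N K r c : Nat) (_hr : r < N) (_hc : c < K) (φ : Nat → Nat → String) (v : String) :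
    pvSet2 (pvMkGrid N K φ) (r : Int) (c : Int) v
      = pvMkGrid N K (fun r' c' => if r' = r ∧ c' = c then v else φ r' c') := by
  unfold pvSet2 pvMkGrid
  simp only [Int.toNat_natCast]
  apply List.ext_getElem
  · simp
  · intro j h1 h2
    simp only [List.getElem_modify, List.getElem_map, List.getElem_range] at *
    by_cases hj : r = j
    · subst hj
      apply List.ext_getElem
      · simp
      · intro i h3 h4
        simp only [List.getElem_map, List.getElem_range] at *
        by_cases hi : c = i
        · subst hi; simp
        · simp [hi, Ne.symm hi]
    · simp only [if_neg hj]
      apply List.ext_getElem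
      · simp
      · intro i h3 h4
        simp only [List.getElem_map, List.length_map, List.length_range, List.getElem_range] at *
        have : ¬ (j = r ∧ i = c) := fun ⟨a, _⟩ => hj a.symm
        simp [this]

lemma pvInner_fold (L : List Char) (N K c : Nat) (hc : c < K) (φ : Nat → Nat → String)
    (s : Int) (h : Nat) (hh : h ≤ N) :
    (List.range h).foldl
      (fun (st2 : List (List String) × Int) (row : Nat) =>
        (pvSet2 st2.1 (row : Int) (c : Int) (pvChAt L st2.2), st2.2 + 1)) (pvMkGrid N K φ, s)
    = (pvMkGrid N K (fun r' c' => if c' = c ∧ r' < h then pvChAt L (s + r') else φ r' c'), s + h) := by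
  induction h with
  | zero => simp
  | succ m ih =>
    rw [List.range_succ, List.foldl_append]
    rw [ih (le_of_lt (Nat.lt_of_lt_of_le (Nat.lt_succ_self m) hh))]
    simp only [List.foldl_cons, List.foldl_nil]
    rw [pvSet2_mkGrid N K m c (Nat.lt_of_lt_of_le (Nat.lt_succ_self m) hh) hc]
    rw [Prod.mk.injEq]
    refine ⟨?_, ?_⟩
    · apply pvMkGrid_congr
      intro r' _ c' _
      by_cases h1 : r' = m ∧ c' = c
      · obtain ⟨e1, e2⟩ := h1; subst e1; subst e2; simp
      · rw [if_neg h1]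
        by_cases h2 : c' = c ∧ r' < m
        · rw [if_pos h2, if_pos ⟨h2.1, Nat.lt_succ_of_lt h2.2⟩]
        · rw [if_neg h2, if_neg]
          rintro ⟨e1, hlt⟩
          exact h1 ⟨by omega, e1⟩
    · push_cast; ring

lemma pvOuter_fold (L : List Char) (N K : Nat)
    (hbound : ∀ c < K, pvHgt L.length K c ≤ N) (k : Nat) (hk : k ≤ K) :
    (List.range k).foldl
      (fun (st : List (List String) × Int) (col : Nat) =>
        (List.range (pvHgt L.length K col)).foldl
          (fun (st2 : List (List String) × Int) (row : Nat) =>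
            (pvSet2 st2.1 (row : Int) (col : Int) (pvChAt L st2.2), st2.2 + 1)) st)
      (pvMkGrid N K (fun _ _ => ""), 0)
    = (pvMkGrid N K (fun r c => if c < k ∧ r < pvHgt L.length K c
          then pvChAt L ((pvStart L.length K c + r : Nat) : Int) else ""),
       ((pvStart L.length K k : Nat) : Int)) := by
  induction k with
  | zero => simp [pvStart]
  | succ m ih =>
    rw [List.range_succ, List.foldl_append]
    rw [ih (by omega)]
    simp only [List.foldl_cons, List.foldl_nil]
    rw [pvInner_fold L N K m (by omega) _ _ _ (hbound m (by omega))]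
    rw [Prod.mk.injEq]
    refine ⟨?_, ?_⟩
    · apply pvMkGrid_congr
      intro r' _ c' _
      by_cases e : c' = m
      · subst e
        by_cases h1 : r' < pvHgt L.length K c'
        · rw [if_pos ⟨rfl, h1⟩, if_pos ⟨Nat.lt_succ_self _, h1⟩]
          push_cast; ring_nf
        · rw [if_neg (fun h => h1 h.2), if_neg (fun h => absurd h.1 (by omega)),
            if_neg (fun h => h1 h.2)]
      · rw [if_neg (fun h => e h.1)]
        by_cases h2 : c' < m ∧ r' < pvHgt L.length K c'
        · rw [if_pos h2, if_pos ⟨by omega, h2.2⟩]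
        · rw [if_neg h2, if_neg (fun h => h2 ⟨by omega, h.2⟩)]
    · have hstep : pvStart L.length K m + pvHgt L.length K m = pvStart L.length K (m + 1) := by
        unfold pvStart pvHgt
        rw [Nat.succ_mul]
        by_cases hc : m < L.length % K <;> simp [hc] <;> omega
      exact_mod_cast hstep

-- casts: floordiv / mod of the (Nat) length by a positive key
lemma pvKeyPos_casts (nn : Nat) (key : Int) (hkey : 0 < key) :
    PySem.Int.floordiv (nn : Int) key = ((nn / key.toNat : Nat) : Int) ∧
      PySem.Int.mod (nn : Int) key = ((nn % key.toNat : Nat) : Int) := by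
  have h1 : key = ((key.toNat : Nat) : Int) := by omega
  rw [h1, PySem.Int.floordiv_natCast, PySem.Int.mod_natCast]
  exact ⟨rfl, rfl⟩


-- ===== VERDICT (by name: the statement is the Claim_ definition above) =====
theorem populate_grid_for_decryption_spec : Claim_equal_populate_grid_for_decryption := by
  intro ciphertext num_rows key _ hpre
  obtain ⟨hk0, hbd⟩ := hpre
  unfold Spec_populate_grid_for_decryption
  by_cases hkey : 0 < key
  · -- positive key
    set L := ciphertext.toList with hL
    set nn : Nat := L.length with hnn
    set K : Nat := key.toNat with hKdef
    have hKcast : key = (K : Int) := by omega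
    have hKpos : 0 < K := by omega
    set N : Nat := num_rows.toNat with hNdef
    have hlen : PySem.Str.len ciphertext = (nn : Int) := by
      simp [PySem.Str.len_eq, hnn, hL]
    obtain ⟨hfd, hmd⟩ := pvKeyPos_casts nn key hkey
    rw [hKcast] at hfd hmd
    simp only [Int.toNat_natCast] at hfd hmd
    have hNR : PySem.List.pyRange 0 num_rows 1 = (List.range N).map (fun k => ((k : Nat) : Int)) := by
      rw [PySem.List.pyRange_one]
      have h1 : (num_rows - 0).toNat = N := by omega
      rw [h1]
      exact List.map_congr_left (fun a _ => by omega)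
    have hmlt : nn % K < K := Nat.mod_lt _ hKpos
    -- the bound in Nat form
    have hbound : ∀ c < K, pvHgt nn K c ≤ N := by
      intro c hc
      rcases hbd hkey with h | h
      · have h0 : nn = 0 := by
          rw [hnn, hL]; simpa using congrArg (fun s => s.toList.length) h
        simp [pvHgt, h0]
      · rw [hlen, hKcast, hfd, hmd] at h
        unfold pvHgt
        by_cases hc2 : c < nn % K
        · have hne : ¬ ((nn % K : Nat) : Int) = 0 := by omega
          rw [if_neg hne] at h
          simp only [hc2, if_pos]
          omega
        · simp only [hc2, if_false]
          by_cases hz : nn % K = 0 <;> simp [hz] at h <;> omega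
    -- the initial grid in pvMkGrid form
    have hgrid0 : initialize_grid num_rows key = pvMkGrid N K (fun _ _ => "") := by
      unfold initialize_grid pvMkGrid
      rw [hKcast, PySem.List.pyRange_zero_nat K, hNR, List.map_map, List.map_map]
      rfl
    -- A's nested loops in Nat form
    have hA : populate_grid_for_decryption ciphertext num_rows key =
        ((List.range K).foldl
          (fun (st : List (List String) × Int) (col : Nat) =>
            (List.range (pvHgt nn K col)).foldl
              (fun (st2 : List (List String) × Int) (row : Nat) =>
                (pvSet2 st2.1 (row : Int) (col : Int) (pvChAt L st2.2), st2.2 + 1)) st)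
          (pvMkGrid N K (fun _ _ => ""), 0)).1 := by
      simp only [populate_grid_for_decryption, hlen, hgrid0]
      rw [hKcast, hfd, hmd, PySem.List.pyRange_zero_nat K, List.foldl_map]
      congr 1
      apply PySem.List.foldl_congr_mem
      intro acc k hk
      have hkK : k < K := List.mem_range.mp hk
      rw [← PySem.List.pyRange_zero_nat K,
        PySem.List.pyGetD_map_pyRange (fun i => ((nn / K : Nat) : Int) + (if i < ((nn % K : Nat) : Int) then (1 : Int) else 0)) K k 0 hkK]
      have hfk : ((nn / K : Nat) : Int) + (if ((k : Nat) : Int) < ((nn % K : Nat) : Int) then (1 : Int) else 0)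
          = ((pvHgt nn K k : Nat) : Int) := by
        unfold pvHgt
        by_cases h : k < nn % K <;> simp [h] <;> omega
      rw [hfk, PySem.List.pyRange_zero_nat (pvHgt nn K k), List.foldl_map]
    rw [hA, pvOuter_fold L N K (by rw [← hnn]; exact hbound) K le_rfl]
    -- B in pvMkGrid form, then pointwise comparison
    simp only [populate_grid_for_decryption_alt, hlen]
    rw [hKcast, hfd, hmd, PySem.List.pyRange_zero_nat K, hNR]
    simp only [List.map_map]
    unfold pvMkGrid
    apply List.map_congr_left
    intro r hrm
    apply List.map_congr_left
    intro c hcm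
    have hc : c < K := List.mem_range.mp hcm
    simp only [Function.comp]
    have hcond : (((r : Nat) : Int) < ((nn / K : Nat) : Int) + (if ((c : Nat) : Int) < ((nn % K : Nat) : Int) then (1 : Int) else 0))
        ↔ (c < K ∧ r < pvHgt nn K c) := by
      unfold pvHgt
      by_cases h : c < nn % K <;> simp [h] <;> omega
    by_cases h : c < K ∧ r < pvHgt nn K c
    · rw [if_pos (hcond.mpr h), if_pos h]
      congr 1
      unfold pvStart
      rw [Nat.cast_add, Nat.cast_add, Nat.cast_mul, Nat.cast_min]
    · rw [if_neg (fun hx => h (hcond.mp hx)), if_neg h]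
  · -- key ≤ 0 (and key ≠ 0): every range(key) is empty, both return num_rows empty rows
    have hle : key ≤ 0 := by omega
    simp [populate_grid_for_decryption, populate_grid_for_decryption_alt, initialize_grid,
      PySem.List.pyRange_one_eq_nil hle]
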